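-- pv_equiv track=rewrite | github.com/JudyHsiao/codejam | googol_str.py | googol
-- ===== SOURCE A (Python) =====
-- import math
--
-- def isone(l,k):
--     if k == int(math.ceil(l/2)):
--         return False
--     elif k <= l//2:
--         return isone(l//2, k)
--     else:
--         return not isone(l//2, l-k+1)
--
-- def googol(k):
--     l = 0
--     while l <= k:
--         l = 2*l+1
--
--     if isone(l, k):
--         return 1
--     else:
--         return 0
-- ===== SOURCE B (Python) =====
-- def googol(k):
--     l = 0
--     while l <= k:
--         l = 2 * l + 1
--     flips = 0
--     while True:
--         mid = (l + 1) // 2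
--         if k == mid:
--             return flips
--         if k <= l // 2:
--             l = l // 2
--         else:
--             k = l - k + 1
--             flips = 1 - flips
--             l = l // 2
-- ===== Notes on version B (the rewrite author's own statement) =====
-- stated objective: alternative
-- what changed: Replaced the recursive isone (with a negation on the reflected branch) by a single iterative loop carrying a 0/1 parity accumulator: each step compares k to the midpoint, descends into the left half or reflects k = l-k+1 flipping the parity, and returns the parity at the midpoint.
import Mathlib
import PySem

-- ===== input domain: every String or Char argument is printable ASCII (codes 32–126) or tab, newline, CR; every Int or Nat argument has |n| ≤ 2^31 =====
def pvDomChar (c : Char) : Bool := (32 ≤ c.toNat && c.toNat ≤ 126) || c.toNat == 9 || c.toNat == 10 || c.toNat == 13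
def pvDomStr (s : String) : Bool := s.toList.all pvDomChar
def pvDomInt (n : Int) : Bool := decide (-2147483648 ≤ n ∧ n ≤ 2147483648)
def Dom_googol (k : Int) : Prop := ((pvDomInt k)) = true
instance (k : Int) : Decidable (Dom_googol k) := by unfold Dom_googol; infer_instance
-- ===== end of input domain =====

-- B replaces A's recursive isone (negating on the reflected branch) by an iterative
-- loop carrying a 0/1 parity accumulator (objective: alternative decomposition).

-- ===== PORT A =====
-- The 'while l <= k' loop and the recursion of isone are fuel-bounded: both diverge in
-- Python for k < 0 (excluded by Pre_); fuel chosen in googol is provably sufficient on Pre_.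
-- int(math.ceil(l/2)) is ported exactly as floordiv (l+1) 2 (exact: |l| < 2^53 on Dom).
def isoneA : Nat → Int → Int → Bool
  | 0, _, _ => false  -- unreachable with the fuel googol supplies, on Pre_
  | fuel+1, l, k =>
    if k = PySem.Int.floordiv (l + 1) 2 then false
    else if k ≤ PySem.Int.floordiv l 2 then isoneA fuel (PySem.Int.floordiv l 2) k
    else ! isoneA fuel (PySem.Int.floordiv l 2) (l - k + 1)

def seedA : Nat → Int → Int → Int
  | 0, _, l => l  -- unreachable with the fuel googol supplies, on Pre_
  | fuel+1, k, l => if l ≤ k then seedA fuel k (2 * l + 1) else l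

def googol (k : Int) : Int :=
  let l := seedA (k.toNat + 2) k 0
  if isoneA (l.toNat + 1) l k then 1 else 0

-- ===== PORT B =====
def seedB : Nat → Int → Int → Int
  | 0, _, l => l  -- unreachable with the fuel googol_alt supplies, on Pre_
  | fuel+1, k, l => if l ≤ k then seedB fuel k (2 * l + 1) else l

def loopB : Nat → Int → Int → Int → Int
  | 0, _, _, flips => flips  -- unreachable with the fuel googol_alt supplies, on Pre_
  | fuel+1, l, k, flips =>
    if k = PySem.Int.floordiv (l + 1) 2 then flips
    else if k ≤ PySem.Int.floordiv l 2 then loopB fuel (PySem.Int.floordiv l 2) k flips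
    else loopB fuel (PySem.Int.floordiv l 2) (l - k + 1) (1 - flips)

def googol_alt (k : Int) : Int :=
  let l := seedB (k.toNat + 2) k 0
  loopB (l.toNat + 1) l k 0

-- ===== PRECONDITION & SPEC =====
-- Pre_ excludes k < 0, on which Python A diverges (RecursionError: isone(0,k) recurses forever).
def Pre_googol (k : Int) : Prop := 0 ≤ k
instance (k : Int) : Decidable (Pre_googol k) := by unfold Pre_googol; infer_instance
def pvWitness_googol : Int := (5)
def Spec_googol (k : Int) (out : Int) : Prop := out = googol_alt k
instance (k : Int) (out : Int) : Decidable (Spec_googol k out) := by unfold Spec_googol; infer_instance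

-- ===== CLAIM (what is proved, stated in full; the proofs are below) =====
def Claim_equal_googol : Prop := ∀ (k : Int), Dom_googol k → Pre_googol k → Spec_googol k (googol k)

-- ===== LEMMAS AND PROOFS =====

theorem seedB_eq_seedA : ∀ (f : Nat) (k l : Int), seedB f k l = seedA f k l := by
  intro f
  induction f with
  | zero => intro k l; rfl
  | succ n ih => intro k l; simp [seedA, seedB, ih]

-- the seed value exceeds k when fuel is large enough
theorem seedA_gt : ∀ (f : Nat) (k l : Int), 0 ≤ l → k + 2 ≤ 2 ^ f * (l + 1) →
    k < seedA f k l ∧ 0 ≤ seedA f k l := by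
  intro f
  induction f with
  | zero =>
    intro k l hl h
    simp [seedA]; omega
  | succ n ih =>
    intro k l hl h
    rw [seedA]
    split
    · refine ih k (2 * l + 1) (by omega) ?_
      rw [pow_succ] at h
      have he : (2:Int) ^ n * 2 * (l + 1) = 2 ^ n * (2 * l + 1 + 1) := by ring
      omega
    · omega

theorem fuel_ge (k : Nat) : (k : Int) + 2 ≤ 2 ^ (k + 2) * (0 + 1) := by
  have h : k + 2 ≤ 2 ^ (k + 2) := le_of_lt (Nat.lt_two_pow_self)
  have h2 : ((k : Int)) + 2 ≤ ((2 ^ (k + 2) : Nat) : Int) := by exact_mod_cast h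
  push_cast at h2
  omega

-- main invariant: with 0 ≤ k ≤ l and enough fuel, B's loop computes A's recursion
-- xor'd with the carried parity (as 'if … then 1 - flips else flips').
theorem loop_eq_isone : ∀ (n f : Nat) (l k flips : Int), l.toNat ≤ n → l.toNat < f →
    0 ≤ k → k ≤ l →
    loopB f l k flips = if isoneA f l k then 1 - flips else flips := by
  intro n
  induction n with
  | zero =>
    intro f l k flips hn hf hk hkl
    -- l = 0, hence k = 0, hence the midpoint test fires
    obtain ⟨f', rfl⟩ : ∃ f', f = f' + 1 := ⟨f - 1, by omega⟩
    have hl0 : l = 0 := by omega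
    have hk0 : k = 0 := by omega
    subst hl0; subst hk0
    simp [loopB, isoneA, PySem.Int.floordiv]
  | succ n ih =>
    intro f l k flips hn hf hk hkl
    obtain ⟨f', rfl⟩ : ∃ f', f = f' + 1 := ⟨f - 1, by omega⟩
    rw [loopB, isoneA]
    have h2 : (0:Int) < 2 := by omega
    rw [PySem.Int.floordiv_eq_ediv_of_pos h2, PySem.Int.floordiv_eq_ediv_of_pos h2]
    by_cases hmid : k = (l + 1) / 2
    · simp [hmid]
    · simp only [hmid, if_false]
      by_cases hle : k ≤ l / 2
      · simp only [hle, if_true]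
        exact ih f' (l / 2) k flips (by omega) (by omega) hk hle
      · simp only [hle, if_false]
        have h1 : loopB f' (l / 2) (l - k + 1) (1 - flips)
            = if isoneA f' (l / 2) (l - k + 1) then 1 - (1 - flips) else 1 - flips :=
          ih f' (l / 2) (l - k + 1) (1 - flips) (by omega) (by omega) (by omega) (by omega)
        rw [h1]
        by_cases hr : isoneA f' (l / 2) (l - k + 1) <;> simp [hr]

-- ===== VERDICT (by name: the statement is the Claim_ definition above) =====
theorem googol_spec : Claim_equal_googol := by
  intro k _ hk
  unfold Spec_googol googol googol_alt
  rw [seedB_eq_seedA]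
  have hseed := seedA_gt (k.toNat + 2) k 0 le_rfl
    (by have := fuel_ge k.toNat; simpa [Int.toNat_of_nonneg hk] using this)
  set l := seedA (k.toNat + 2) k 0 with hl
  obtain ⟨hgt, hnn⟩ := hseed
  rw [loop_eq_isone l.toNat (l.toNat + 1) l k 0 le_rfl (by omega) hk (le_of_lt hgt)]
  split <;> simp_all
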